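-- pv_equiv track=rewrite | github.com/Alan-Muk/NeetCodeIO | MaximumXORforEachQuery.py | maximunXOR
-- ===== SOURCE A (Python) =====
-- def maximunXOR(nums:list[int], maximumBit:int) -> list[int]:
-- 	xor = 0
--
-- 	for n in nums:
-- 		xor ^= n
--
-- 	mask = 2 ** maximumBit - 1
-- 	answer = []
-- 	for n in reversed(nums):
-- 		answer.append(xor ^ mask)
-- 		xor ^= n
--
-- 	return answer
-- ===== SOURCE B (Python) =====
-- def maximunXOR(nums: list[int], maximumBit: int) -> list[int]:
--     # build the full forward prefix-XOR table, then map it in reverse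
--     prefix = []
--     acc = 0
--     for n in nums:
--         acc ^= n
--         prefix.append(acc)
--     return [p ^ ((1 << maximumBit) - 1) for p in reversed(prefix)]
-- ===== Notes on version B (the rewrite author's own statement) =====
-- stated objective: alternative
-- what changed: Replaces A's single reverse pass that maintains and decrements a running XOR with a two-phase decomposition: build the forward prefix-XOR table, then map the mask over it in reverse.
import Mathlib
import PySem

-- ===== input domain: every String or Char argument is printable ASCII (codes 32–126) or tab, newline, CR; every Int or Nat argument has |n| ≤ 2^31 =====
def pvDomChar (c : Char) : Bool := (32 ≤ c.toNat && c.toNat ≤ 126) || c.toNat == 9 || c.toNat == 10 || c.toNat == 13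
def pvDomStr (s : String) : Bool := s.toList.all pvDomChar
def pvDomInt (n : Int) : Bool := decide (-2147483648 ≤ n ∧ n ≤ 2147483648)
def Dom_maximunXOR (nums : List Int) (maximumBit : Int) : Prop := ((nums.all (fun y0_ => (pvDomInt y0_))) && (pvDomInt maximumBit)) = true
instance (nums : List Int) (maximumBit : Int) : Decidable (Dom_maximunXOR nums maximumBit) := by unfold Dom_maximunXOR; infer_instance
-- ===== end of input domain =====

-- B replaces A's single reverse pass with a running decremented XOR by a two-phase
-- decomposition: build the forward prefix-XOR table, then map the mask over it in reverse.


-- ===== PORT A =====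
-- literal port of A: fold the total XOR, then one reverse pass that appends xor^mask
-- and decrements the running xor (PySem.Int.bxor is Python's '^' on Int, exact on negatives)
def maximunXOR (nums : List Int) (maximumBit : Int) : List Int :=
  let xor : Int := nums.foldl (fun x n => PySem.Int.bxor x n) 0
  let mask : Int := 2 ^ maximumBit.toNat - 1
  (nums.reverse.foldl
    (fun (p : List Int × Int) n => (p.1 ++ [PySem.Int.bxor p.2 mask], PySem.Int.bxor p.2 n))
    ([], xor)).1

-- ===== PORT B =====
-- literal port of Source B: forward prefix-XOR table, then map the mask over the reversed table
def maximunXOR_alt (nums : List Int) (maximumBit : Int) : List Int :=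
  let st := nums.foldl
    (fun (p : List Int × Int) n => (p.1 ++ [PySem.Int.bxor p.2 n], PySem.Int.bxor p.2 n)) ([], 0)
  st.1.reverse.map (fun p => PySem.Int.bxor p (2 ^ maximumBit.toNat - 1))

-- ===== PRECONDITION & SPEC =====
-- Pre_ excludes exactly the inputs where A raises: a negative maximumBit makes
-- 2**maximumBit a float, so 'xor ^ mask' raises TypeError for any nonempty nums
-- (with empty nums A returns [] even then, and so does B).
def Pre_maximunXOR (nums : List Int) (maximumBit : Int) : Prop :=
  0 ≤ maximumBit ∨ nums = []
instance (nums : List Int) (maximumBit : Int) : Decidable (Pre_maximunXOR nums maximumBit) := by unfold Pre_maximunXOR; infer_instance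
def pvWitness_maximunXOR : List Int × Int := ([3, 1, 2], 2)

def Spec_maximunXOR (nums : List Int) (maximumBit : Int) (out : List Int) : Prop := out = maximunXOR_alt nums maximumBit
instance (nums : List Int) (maximumBit : Int) (out : List Int) : Decidable (Spec_maximunXOR nums maximumBit out) := by unfold Spec_maximunXOR; infer_instance

-- ===== CLAIM (what is proved, stated in full; the proofs are below) =====
def Claim_equal_maximunXOR : Prop := ∀ (nums : List Int) (maximumBit : Int), Dom_maximunXOR nums maximumBit → Pre_maximunXOR nums maximumBit → Spec_maximunXOR nums maximumBit (maximunXOR nums maximumBit)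

-- ===== LEMMAS AND PROOFS =====

theorem natxor_cancel (x y : Nat) : (x ^^^ y) ^^^ y = x := by
  rw [Nat.xor_assoc, Nat.xor_self, Nat.xor_zero]

theorem negneg (z : Int) : -(-z - 1) - 1 = z := by ring

theorem bxor_cancel (s a : Int) : PySem.Int.bxor (PySem.Int.bxor s a) a = s := by
  unfold PySem.Int.bxor
  by_cases hs : 0 ≤ s <;> by_cases ha : 0 ≤ a <;>
    simp only [hs, ha, if_pos, if_false] <;> split_ifs with h1 <;>
    simp only [negneg, Int.toNat_natCast, natxor_cancel] at * <;> omega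

-- functional form of A's reverse loop
def gLoop (mask : Int) : List Int → Int → List Int
  | [], _ => []
  | n :: t, x => PySem.Int.bxor x mask :: gLoop mask t (PySem.Int.bxor x n)

-- functional form of B's prefix-table loop
def pfx : List Int → Int → List Int
  | [], _ => []
  | n :: t, x => PySem.Int.bxor x n :: pfx t (PySem.Int.bxor x n)

theorem foldA_eq (mask : Int) : ∀ (l : List Int) (ans : List Int) (x : Int),
    (l.foldl (fun (p : List Int × Int) n => (p.1 ++ [PySem.Int.bxor p.2 mask], PySem.Int.bxor p.2 n)) (ans, x)).1
      = ans ++ gLoop mask l x := by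
  intro l
  induction l with
  | nil => intro ans x; simp [gLoop]
  | cons n t ih =>
      intro ans x
      simp [List.foldl, gLoop, ih, List.append_assoc]

theorem foldB_eq : ∀ (l : List Int) (ans : List Int) (x : Int),
    (l.foldl (fun (p : List Int × Int) n => (p.1 ++ [PySem.Int.bxor p.2 n], PySem.Int.bxor p.2 n)) (ans, x)).1
      = ans ++ pfx l x := by
  intro l
  induction l with
  | nil => intro ans x; simp [pfx]
  | cons n t ih =>
      intro ans x
      simp [List.foldl, pfx, ih, List.append_assoc]

theorem pfx_append (a : Int) : ∀ (ys : List Int) (x : Int),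
    pfx (ys ++ [a]) x
      = pfx ys x ++ [PySem.Int.bxor (ys.foldl (fun s n => PySem.Int.bxor s n) x) a] := by
  intro ys
  induction ys with
  | nil => intro x; simp [pfx]
  | cons n t ih => intro x; simp [pfx, ih, List.foldl]

theorem main_lemma (mask : Int) : ∀ (nums : List Int) (x : Int),
    gLoop mask nums.reverse (nums.foldl (fun s n => PySem.Int.bxor s n) x)
      = (pfx nums x).reverse.map (fun p => PySem.Int.bxor p mask) := by
  intro nums
  induction nums using List.reverseRecOn with
  | nil => intro x; simp [gLoop, pfx]
  | append_singleton ys a ih =>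
      intro x
      rw [List.reverse_append]
      simp only [List.reverse_singleton, List.singleton_append, List.foldl_append,
        List.foldl_cons, List.foldl_nil, gLoop, pfx_append]
      rw [bxor_cancel, ih]
      simp

theorem maximunXOR_eq (nums : List Int) (maximumBit : Int) :
    maximunXOR nums maximumBit = maximunXOR_alt nums maximumBit := by
  unfold maximunXOR maximunXOR_alt
  simp only [foldA_eq, foldB_eq, List.nil_append, main_lemma]

-- ===== VERDICT (by name: the statement is the Claim_ definition above) =====
theorem maximunXOR_spec : Claim_equal_maximunXOR := by
  intro nums maximumBit _ _
  exact maximunXOR_eq nums maximumBit
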